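-- pv_equiv track=rewrite | github.com/yaya752/PokerAppPython | PokerApp2/High.py | Required_four
-- ===== SOURCE A (Python) =====
-- def Required_four(hand,occur):
--     pro_cards = 1
--     number_card=1
--     have  = False
--     nums = ['A','2','3','4','5','6','7','8','9','T','J','Q','K']
--     remaining_four = 0
--     count_four = 0
--     index_four = nums.index(hand[0])
--     for i in range (4):
--         if occur[i][index_four] == 0:
--             remaining_four +=1
--         elif occur[i][index_four] == 1:
--             count_four +=1
--     if count_four == 0:
--         pro_cards *= remaining_four*(remaining_four-1)*(remaining_four-2)*(remaining_four-3)
--     elif count_four == 1: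
--         pro_cards *= remaining_four*(remaining_four-1)*(remaining_four-2)
--     elif count_four == 2:
--         pro_cards *= remaining_four*(remaining_four-1)
--     elif count_four == 3:
--         pro_cards *= remaining_four
--     return pro_cards
-- ===== SOURCE B (Python) =====
-- def Required_four(hand, occur):
--     # Brute-force enumeration: recursively try every suit that could supply each
--     # still-needed card and sum the ordered completions, instead of a product table.
--     nums = ['A','2','3','4','5','6','7','8','9','T','J','Q','K']
--     idx = nums.index(hand[0])
--     free = [i for i in range(4) if occur[i][idx] == 0]
--     held = [i for i in range(4) if occur[i][idx] == 1]
--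
--     def ways(free, need):
--         if need == 0:
--             return 1
--         total = 0
--         for j in range(len(free)):
--             total += ways(free[:j] + free[j+1:], need - 1)
--         return total
--
--     return ways(free, 4 - len(held))
-- ===== Notes on version B (the rewrite author's own statement) =====
-- stated objective: alternative
-- what changed: The five-branch product table is replaced by a recursive brute-force enumeration: ways(free, need) sums, over each suit still free, the ways to complete the remaining draws, so the count is obtained by exhaustive search instead of a precomputed product formula.
import Mathlib
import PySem

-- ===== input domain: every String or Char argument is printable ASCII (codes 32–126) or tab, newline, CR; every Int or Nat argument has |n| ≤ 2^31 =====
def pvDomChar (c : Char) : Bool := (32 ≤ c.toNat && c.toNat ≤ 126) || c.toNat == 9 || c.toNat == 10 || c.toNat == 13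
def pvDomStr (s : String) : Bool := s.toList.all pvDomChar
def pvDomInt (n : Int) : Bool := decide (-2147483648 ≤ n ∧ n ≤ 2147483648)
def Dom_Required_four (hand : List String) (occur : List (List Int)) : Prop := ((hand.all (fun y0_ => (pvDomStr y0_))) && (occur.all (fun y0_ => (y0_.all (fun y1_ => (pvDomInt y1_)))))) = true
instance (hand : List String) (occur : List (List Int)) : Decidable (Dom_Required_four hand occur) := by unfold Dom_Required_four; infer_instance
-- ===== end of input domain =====

-- B replaces A's five-branch product table by a recursive brute-force enumeration of the
-- ordered draw completions (alternative decomposition, same result).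

def pvNums : List String := ["A","2","3","4","5","6","7","8","9","T","J","Q","K"]

-- ===== PORT A =====
-- loop body of 'for i in range(4)': count zeros into .1 (remaining_four), ones into .2 (count_four)
def pvStep : Int × Int → Int → Int × Int := fun st v =>
  if v == 0 then (st.1 + 1, st.2)
  else if v == 1 then (st.1, st.2 + 1)
  else st

def Required_four (hand : List String) (occur : List (List Int)) : Int :=
  -- pro_cards = 1; dead variables number_card / have omitted (assigned, never read)
  match PySem.List.pyGet? hand 0 with
  | none => 0  -- IndexError: hand[0] (outside Pre_)
  | some h0 =>
    match PySem.List.index? pvNums h0 with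
    | none => 0  -- ValueError: nums.index (outside Pre_)
    | some indexFour =>
      let st := (PySem.List.pyRange 0 4 1).foldl (fun (st : Int × Int) i =>
        match PySem.List.pyGet? occur i with
        | none => st  -- IndexError (outside Pre_)
        | some row =>
          match PySem.List.pyGet? row (Int.ofNat indexFour) with
          | none => st  -- IndexError (outside Pre_)
          | some v => pvStep st v) ((0 : Int), (0 : Int))
      let r := st.1
      let c := st.2
      if c == 0 then 1 * (r * (r - 1) * (r - 2) * (r - 3))
      else if c == 1 then 1 * (r * (r - 1) * (r - 2))
      else if c == 2 then 1 * (r * (r - 1))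
      else if c == 3 then 1 * r
      else 1

-- ===== PORT B =====
-- 'ways(free, need)': sum over each free suit of the ways to finish the remaining draws.
-- 'need' is a Nat: in Source B it is 4 - len(held) ≥ 0 and only decreases to the 0 base case.
def pvWays (free : List Int) (need : Nat) : Int :=
  match need with
  | 0 => 1
  | n + 1 =>
    (PySem.List.pyRange 0 (free.length : Int) 1).foldl
      (fun total j => total +
        pvWays (PySem.List.slice free none (some j) ++ PySem.List.slice free (some (j + 1)) none) n)
      0

def Required_four_alt (hand : List String) (occur : List (List Int)) : Int :=
  match PySem.List.pyGet? hand 0 with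
  | none => 0  -- IndexError (outside Pre_)
  | some h0 =>
    match PySem.List.index? pvNums h0 with
    | none => 0  -- ValueError (outside Pre_)
    | some idx =>
      -- free/held = [i for i in range(4) if occur[i][idx] == 0 / == 1]
      let look := fun (i : Int) =>
        (PySem.List.pyGet? occur i).bind (fun r => PySem.List.pyGet? r (Int.ofNat idx))
      let free := (PySem.List.pyRange 0 4 1).filter (fun i => look i == some 0)
      let held := (PySem.List.pyRange 0 4 1).filter (fun i => look i == some 1)
      pvWays free (4 - held.length)

-- ===== PRECONDITION & SPEC =====
-- Pre_ excludes exactly the inputs where A raises: empty hand or hand[0] not a rank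
-- (IndexError/ValueError), fewer than 4 rows, or a scanned row too short (IndexError).
def Pre_Required_four (hand : List String) (occur : List (List Int)) : Prop :=
  hand ≠ [] ∧ (hand.headD "") ∈ pvNums ∧ 4 ≤ occur.length ∧
  ∀ row ∈ occur.take 4, pvNums.idxOf (hand.headD "") < row.length
instance (hand : List String) (occur : List (List Int)) : Decidable (Pre_Required_four hand occur) := by unfold Pre_Required_four; infer_instance

def pvWitness_Required_four : List String × List (List Int) :=
  (["7"], [[0,0,0,0,0,0,1,0,0,0,0,0,0], [0,0,0,0,0,0,0,0,0,0,0,0,0],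
           [0,0,0,0,0,0,2,0,0,0,0,0,0], [0,0,0,0,0,0,0,0,0,0,0,0,0]])

def Spec_Required_four (hand : List String) (occur : List (List Int)) (out : Int) : Prop := out = Required_four_alt hand occur
instance (hand : List String) (occur : List (List Int)) (out : Int) : Decidable (Spec_Required_four hand occur out) := by unfold Spec_Required_four; infer_instance

-- ===== CLAIM (what is proved, stated in full; the proofs are below) =====
def Claim_equal_Required_four : Prop := ∀ (hand : List String) (occur : List (List Int)), Dom_Required_four hand occur → Pre_Required_four hand occur → Spec_Required_four hand occur (Required_four hand occur)

-- ===== LEMMAS AND PROOFS =====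

-- A's counting loop computes exactly the two counts
lemma pv_fold_counts (l : List Int) (a b : Int) :
    l.foldl pvStep (a, b)
      = (a + l.countP (· == (0:Int)), b + l.countP (· == (1:Int))) := by
  induction l generalizing a b with
  | nil => simp
  | cons v t ih =>
    by_cases h0 : v = 0
    · subst h0; simp [pvStep, ih]; omega
    · by_cases h1 : v = 1
      · subst h1; simp [pvStep, ih]; omega
      · simp [pvStep, ih, h0, h1]

-- B's enumeration counts the injective draw sequences: it only depends on how many
-- free suits there are, and equals the falling factorial
lemma pv_ways_eq (need : Nat) : ∀ free : List Int,
    pvWays free need = Int.ofNat (Nat.descFactorial free.length need) := by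
  induction need with
  | zero => intro free; simp [pvWays]
  | succ n ih =>
    intro free
    rw [pvWays]
    have hterm : ∀ j ∈ PySem.List.pyRange 0 (free.length : Int) 1,
        pvWays (PySem.List.slice free none (some j) ++ PySem.List.slice free (some (j + 1)) none) n
          = Int.ofNat (Nat.descFactorial (free.length - 1) n) := by
      intro j hj
      rw [PySem.List.mem_pyRange_one] at hj
      obtain ⟨h0, hlt⟩ := hj
      rw [PySem.List.slice_to _ h0, PySem.List.slice_from _ (by omega), ih]
      congr 2
      simp only [List.length_append, List.length_take, List.length_drop]
      omega
    rw [PySem.List.foldl_congr_mem _ _ (fun total _ =>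
        total + Int.ofNat (Nat.descFactorial (free.length - 1) n)) _
        (fun acc j hj => by rw [hterm j hj])]
    have hconst : ∀ (l : List Int) (c a : Int),
        l.foldl (fun total _ => total + c) a = a + l.length * c := by
      intro l c
      induction l with
      | nil => simp
      | cons x t iht => intro a; rw [List.foldl_cons, iht, List.length_cons]; push_cast; ring
    rw [hconst, PySem.List.length_pyRange_one]
    cases hL : free.length with
    | zero => simp
    | succ l =>
      rw [Nat.succ_descFactorial_succ]
      have h1l : (((l : Int) + 1 - 0).toNat) = l + 1 := by omega
      rw [show ((l:Nat) + 1 - 1) = l from rfl]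
      simp only [Int.ofNat_eq_natCast]
      push_cast [h1l]
      ring

-- the branch cascade equals the falling factorial of the two counts
lemma pv_arith (x y : Nat) (hx : x ≤ 4) (hy : y ≤ 4) :
    (if ((y:Int) == 0) = true then 1 * ((x:Int) * ((x:Int)-1) * ((x:Int)-2) * ((x:Int)-3))
     else if ((y:Int) == 1) = true then 1 * ((x:Int) * ((x:Int)-1) * ((x:Int)-2))
     else if ((y:Int) == 2) = true then 1 * ((x:Int) * ((x:Int)-1))
     else if ((y:Int) == 3) = true then 1 * (x:Int)
     else 1)
      = Int.ofNat (Nat.descFactorial x (4 - y)) := by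
  interval_cases x <;> interval_cases y <;> decide

-- ===== VERDICT (by name: the statement is the Claim_ definition above) =====
theorem Required_four_spec : Claim_equal_Required_four := by
  intro hand occur _ hpre
  obtain ⟨hne, hmem, hlen, hrows⟩ := hpre
  obtain ⟨h0, hrest, rfl⟩ : ∃ h0 hrest, hand = h0 :: hrest := by
    cases hand with
    | nil => exact absurd rfl hne
    | cons x xs => exact ⟨x, xs, rfl⟩
  simp only [List.headD_cons] at hmem hrows
  have hidx : PySem.List.index? pvNums h0 = some (pvNums.idxOf h0) := by
    rw [PySem.List.index?_eq_idxOf?]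
    obtain ⟨k, hk⟩ := Option.isSome_iff_exists.mp (List.isSome_idxOf?.mpr hmem)
    rw [hk, List.idxOf_eq_getD_idxOf?, hk]
    rfl
  set idx := pvNums.idxOf h0 with hidxdef
  obtain ⟨r0, r1, r2, r3, rest, rfl⟩ :
      ∃ r0 r1 r2 r3 rest, occur = r0 :: r1 :: r2 :: r3 :: rest := by
    match occur with
    | a :: b :: c :: d :: t => exact ⟨a, b, c, d, t, rfl⟩
    | [] | [_] | [_, _] | [_, _, _] => simp at hlen
  have hr0 : idx < r0.length := hrows r0 (by simp)
  have hr1 : idx < r1.length := hrows r1 (by simp)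
  have hr2 : idx < r2.length := hrows r2 (by simp)
  have hr3 : idx < r3.length := hrows r3 (by simp)
  have e0 : PySem.List.pyGet? r0 (Int.ofNat idx) = some r0[idx] := PySem.List.pyGet?_ofNat r0 idx hr0
  have e1 : PySem.List.pyGet? r1 (Int.ofNat idx) = some r1[idx] := PySem.List.pyGet?_ofNat r1 idx hr1
  have e2 : PySem.List.pyGet? r2 (Int.ofNat idx) = some r2[idx] := PySem.List.pyGet?_ofNat r2 idx hr2
  have e3 : PySem.List.pyGet? r3 (Int.ofNat idx) = some r3[idx] := PySem.List.pyGet?_ofNat r3 idx hr3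
  have hrange : PySem.List.pyRange 0 4 1 = [0, 1, 2, 3] := by decide
  unfold Spec_Required_four Required_four Required_four_alt
  simp only [PySem.List.pyGet?_zero_cons]
  rw [hidx]
  have g0 : PySem.List.pyGet? (r0 :: r1 :: r2 :: r3 :: rest) 0 = some r0 := by
    simp [PySem.List.pyGet?, PySem.List.pyIdx?]; rw [if_pos (by omega)]; rfl
  have g1 : PySem.List.pyGet? (r0 :: r1 :: r2 :: r3 :: rest) 1 = some r1 := by
    simp [PySem.List.pyGet?, PySem.List.pyIdx?]; rw [if_pos (by omega)]; rfl
  have g2 : PySem.List.pyGet? (r0 :: r1 :: r2 :: r3 :: rest) 2 = some r2 := by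
    simp [PySem.List.pyGet?, PySem.List.pyIdx?]; rw [if_pos (by omega)]; rfl
  have g3 : PySem.List.pyGet? (r0 :: r1 :: r2 :: r3 :: rest) 3 = some r3 := by
    simp [PySem.List.pyGet?, PySem.List.pyIdx?]; rw [if_pos (by omega)]; rfl
  simp only [hrange, List.foldl_cons, List.foldl_nil, g0, g1, g2, g3, e0, e1, e2, e3]
  -- A side: the four pvStep applications are the fold, hence the two counts
  have hfold : pvStep (pvStep (pvStep (pvStep ((0:Int), (0:Int)) r0[idx]) r1[idx]) r2[idx]) r3[idx]
      = ((([r0[idx], r1[idx], r2[idx], r3[idx]].countP (· == (0:Int)) : Int)),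
         (([r0[idx], r1[idx], r2[idx], r3[idx]].countP (· == (1:Int)) : Int))) := by
    have h := pv_fold_counts [r0[idx], r1[idx], r2[idx], r3[idx]] 0 0
    simpa [List.foldl] using h
  rw [hfold]
  dsimp only
  -- B side: the filter lengths are the two counts
  rw [pv_ways_eq]
  rw [← List.countP_eq_length_filter, ← List.countP_eq_length_filter]
  have hc0 : ([0, 1, 2, 3] : List Int).countP
      (fun i => ((PySem.List.pyGet? (r0 :: r1 :: r2 :: r3 :: rest) i).bind
        fun r => PySem.List.pyGet? r (Int.ofNat idx)) == some 0)
      = [r0[idx], r1[idx], r2[idx], r3[idx]].countP (· == (0:Int)) := by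
    simp [List.countP_cons, g0, g1, g2, g3, hr0, hr1, hr2, hr3]
  have hc1 : ([0, 1, 2, 3] : List Int).countP
      (fun i => ((PySem.List.pyGet? (r0 :: r1 :: r2 :: r3 :: rest) i).bind
        fun r => PySem.List.pyGet? r (Int.ofNat idx)) == some 1)
      = [r0[idx], r1[idx], r2[idx], r3[idx]].countP (· == (1:Int)) := by
    simp [List.countP_cons, g0, g1, g2, g3, hr0, hr1, hr2, hr3]
  rw [hc0, hc1]
  exact pv_arith _ _
    (le_trans List.countP_le_length (by simp))
    (le_trans List.countP_le_length (by simp))
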